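-- pv_equiv track=rewrite | github.com/psharda/krome | tools/kexplorer/kexplorer_utils.py | parentheticContents
-- ===== SOURCE A (Python) =====
-- def parentheticContents(string):
-- 	stack = []
-- 	for i, c in enumerate(string):
-- 	    if c == '{':
-- 	        stack.append(i)
-- 	    elif c == '}' and stack:
-- 	        start = stack.pop()
-- 	        yield (len(stack), string[start + 1: i])
-- ===== SOURCE B (Python) =====
-- def parentheticContents(string):
--     n = len(string)
--
--     def go(i, depth):
--         # scans from index i at nesting depth `depth`; yields (depth_label, content)
--         # for pairs closed within; returns the index of the '}' closing this level,
--         # or n if the scan reaches the end of the string.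
--         while i < n:
--             c = string[i]
--             if c == '{':
--                 close = yield from go(i + 1, depth + 1)
--                 if close < n:
--                     yield (depth, string[i + 1: close])
--                 i = close + 1
--             elif c == '}' and depth > 0:
--                 return i
--             else:
--                 i += 1
--         return n
--
--     yield from go(0, 0)
-- ===== Notes on version B (the rewrite author's own statement) =====
-- stated objective: alternative
-- what changed: Replaced the single linear scan with an explicit stack of open-brace indices by a recursive-descent generator: one recursive helper call per nesting level that yields its children and returns the index of its matching close brace to the parent.
import Mathlib
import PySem

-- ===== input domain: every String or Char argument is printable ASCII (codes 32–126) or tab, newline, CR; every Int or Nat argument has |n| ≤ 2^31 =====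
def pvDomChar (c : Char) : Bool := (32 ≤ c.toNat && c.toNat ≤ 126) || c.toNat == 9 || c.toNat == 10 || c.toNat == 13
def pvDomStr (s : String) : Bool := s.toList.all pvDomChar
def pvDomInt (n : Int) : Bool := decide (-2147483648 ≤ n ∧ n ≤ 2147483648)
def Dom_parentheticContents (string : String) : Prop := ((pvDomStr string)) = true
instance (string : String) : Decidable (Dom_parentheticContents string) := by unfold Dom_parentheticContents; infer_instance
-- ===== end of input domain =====

-- B replaces A's linear scan with an explicit index stack by a recursive descent
-- (one recursive helper per nesting level, threading the close index back): an
-- alternative decomposition of the same O(n + output) generator, not faster.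

-- ===== PORT A =====
-- A: for i, c in enumerate(string): push '{' indices, on '}' with nonempty stack
-- pop and yield (len(stack), string[start+1:i]).  Generator ported as the list
-- of its yields.
def pvStepA (s : List Char) (st : List Int × List (Int × String)) (ic : Int × Char) :
    List Int × List (Int × String) :=
  if ic.2 = '{' then (ic.1 :: st.1, st.2)
  else if ic.2 = '}' ∧ st.1 ≠ [] then
    match st.1 with
    | [] => st
    | start :: rest =>
        (rest, st.2 ++ [((rest.length : Int), String.ofList (PySem.List.slice s (some (start + 1)) (some ic.1)))])
  else st

def parentheticContents (string : String) : List (Int × String) :=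
  let s := string.toList
  ((PySem.List.enumerate s 0).foldl (pvStepA s) ([], [])).2

-- ===== PORT B =====
-- B: go(i, depth) scans from i; on '{' recurses at depth+1, the recursive call
-- returns the index of its matching '}' (or n), then yields (depth, content).
-- `fuel` is a termination bound only (initial n+1 is always sufficient).
def pvGoB (s : List Char) : Nat → Nat → Nat → Nat × List (Int × String)
  | 0, _, _ => (s.length, [])
  | fuel + 1, i, d =>
    if h : i < s.length then
      if s[i] = '{' then
        if (pvGoB s fuel (i + 1) (d + 1)).1 < s.length then
          ((pvGoB s fuel ((pvGoB s fuel (i + 1) (d + 1)).1 + 1) d).1,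
            (pvGoB s fuel (i + 1) (d + 1)).2
              ++ [((d : Int), String.ofList ((s.drop (i + 1)).take ((pvGoB s fuel (i + 1) (d + 1)).1 - (i + 1))))]
              ++ (pvGoB s fuel ((pvGoB s fuel (i + 1) (d + 1)).1 + 1) d).2)
        else (s.length, (pvGoB s fuel (i + 1) (d + 1)).2)
      else if s[i] = '}' ∧ 0 < d then (i, [])
      else pvGoB s fuel (i + 1) d
    else (s.length, [])

def parentheticContents_alt (string : String) : List (Int × String) :=
  let s := string.toList
  (pvGoB s (s.length + 1) 0 0).2

-- ===== PRECONDITION & SPEC =====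
def Spec_parentheticContents (string : String) (out : List (Int × String)) : Prop := out = parentheticContents_alt string
instance (string : String) (out : List (Int × String)) : Decidable (Spec_parentheticContents string out) := by unfold Spec_parentheticContents; infer_instance

-- ===== CLAIM (what is proved, stated in full; the proofs are below) =====
def Claim_equal_parentheticContents : Prop := ∀ (string : String), Dom_parentheticContents string → Spec_parentheticContents string (parentheticContents string)

-- ===== LEMMAS AND PROOFS =====

-- A's loop, rewritten as index recursion over the suffix `t = s.drop i` with a Nat stack.
def pvLoopA (s : List Char) : List Char → Nat → List Nat → List (Int × String) → List (Int × String)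
  | [], _, _, acc => acc
  | c :: t, i, stk, acc =>
    if c = '{' then pvLoopA s t (i + 1) (i :: stk) acc
    else if c = '}' then
      match stk with
      | [] => pvLoopA s t (i + 1) [] acc
      | j :: rest =>
          pvLoopA s t (i + 1) rest
            (acc ++ [((rest.length : Int), String.ofList ((s.drop (j + 1)).take (i - (j + 1))))])
    else pvLoopA s t (i + 1) stk acc

lemma pvLoopA_nil (s : List Char) (i : Nat) (stk : List Nat) (acc : List (Int × String)) :
    pvLoopA s [] i stk acc = acc := by cases stk <;> rfl

lemma pvLoopA_open (s : List Char) (c : Char) (t : List Char) (i : Nat) (stk : List Nat)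
    (acc : List (Int × String)) (hc : c = '{') :
    pvLoopA s (c :: t) i stk acc = pvLoopA s t (i + 1) (i :: stk) acc := by
  cases stk <;> simp [pvLoopA, hc]

lemma pvLoopA_close_nil (s : List Char) (c : Char) (t : List Char) (i : Nat)
    (acc : List (Int × String)) (_hc : ¬ c = '{') (hc2 : c = '}') :
    pvLoopA s (c :: t) i [] acc = pvLoopA s t (i + 1) [] acc := by
  simp [pvLoopA, hc2]

lemma pvLoopA_close_cons (s : List Char) (c : Char) (t : List Char) (i j : Nat) (rest : List Nat)
    (acc : List (Int × String)) (_hc : ¬ c = '{') (hc2 : c = '}') :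
    pvLoopA s (c :: t) i (j :: rest) acc
      = pvLoopA s t (i + 1) rest
          (acc ++ [((rest.length : Int), String.ofList ((s.drop (j + 1)).take (i - (j + 1))))]) := by
  simp [pvLoopA, hc2]

lemma pvLoopA_other (s : List Char) (c : Char) (t : List Char) (i : Nat) (stk : List Nat)
    (acc : List (Int × String)) (hc : ¬ c = '{') (hc2 : ¬ c = '}') :
    pvLoopA s (c :: t) i stk acc = pvLoopA s t (i + 1) stk acc := by
  cases stk <;> simp [pvLoopA, hc, hc2]

lemma pvFoldl_eq_loopA (s : List Char) :
    ∀ (t : List Char) (i : Nat) (stk : List Nat) (acc : List (Int × String)),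
      ((PySem.List.enumerate t (i : Int)).foldl (pvStepA s)
          (stk.map (fun n : Nat => (n : Int)), acc)).2 = pvLoopA s t i stk acc := by
  intro t
  induction t with
  | nil => intro i stk acc; simp [PySem.List.enumerate_nil, pvLoopA_nil]
  | cons c t ih =>
    intro i stk acc
    rw [PySem.List.enumerate_cons, List.foldl_cons]
    have h1 : (i : Int) + 1 = ((i + 1 : Nat) : Int) := by push_cast; ring
    by_cases hc : c = '{'
    · have hstep : pvStepA s (stk.map (fun n : Nat => (n : Int)), acc) ((i : Int), c)
          = ((i :: stk).map (fun n : Nat => (n : Int)), acc) := by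
        simp [pvStepA, hc]
      rw [hstep, h1, ih, pvLoopA_open s c t i stk acc hc]
    · by_cases hc2 : c = '}'
      · cases stk with
        | nil =>
          have hstep : pvStepA s (([] : List Nat).map (fun n : Nat => (n : Int)), acc) ((i : Int), c)
              = (([] : List Nat).map (fun n : Nat => (n : Int)), acc) := by
            simp [pvStepA, hc2]
          rw [hstep, h1, ih, pvLoopA_close_nil s c t i acc hc hc2]
        | cons j rest =>
          have h2 : (j : Int) + 1 = ((j + 1 : Nat) : Int) := by push_cast; ring
          have hstep : pvStepA s ((j :: rest).map (fun n : Nat => (n : Int)), acc) ((i : Int), c)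
              = (rest.map (fun n : Nat => (n : Int)),
                 acc ++ [((rest.length : Int), String.ofList ((s.drop (j + 1)).take (i - (j + 1))))]) := by
            simp only [pvStepA, List.map_cons]
            rw [if_neg hc]
            rw [if_pos (show c = '}' ∧ ((j : Int) :: rest.map (fun n : Nat => (n : Int))) ≠ []
                  from ⟨hc2, by simp⟩)]
            rw [h2, PySem.List.slice_natCast]
            simp
          rw [hstep, h1, ih, pvLoopA_close_cons s c t i j rest acc hc hc2]
      · have hstep : pvStepA s (stk.map (fun n : Nat => (n : Int)), acc) ((i : Int), c)
            = (stk.map (fun n : Nat => (n : Int)), acc) := by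
          simp [pvStepA, hc, hc2]
        rw [hstep, h1, ih, pvLoopA_other s c t i stk acc hc hc2]

lemma pvGoB_bounds (s : List Char) :
    ∀ (fuel i d : Nat), i ≤ s.length →
      i ≤ (pvGoB s fuel i d).1 ∧ (pvGoB s fuel i d).1 ≤ s.length := by
  intro fuel
  induction fuel with
  | zero => intro i d hi; simpa [pvGoB] using hi
  | succ fuel ih =>
    intro i d hi
    rw [pvGoB]
    by_cases h : i < s.length
    · rw [dif_pos h]
      by_cases hc : s[i] = '{'
      · rw [if_pos hc]
        have h1 := ih (i + 1) (d + 1) h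
        by_cases h2 : (pvGoB s fuel (i + 1) (d + 1)).1 < s.length
        · rw [if_pos h2]
          have h3 := ih ((pvGoB s fuel (i + 1) (d + 1)).1 + 1) d h2
          exact ⟨by omega, h3.2⟩
        · rw [if_neg h2]; exact ⟨hi, le_refl _⟩
      · rw [if_neg hc]
        by_cases hd : s[i] = '}' ∧ 0 < d
        · rw [if_pos hd]; exact ⟨le_refl _, le_of_lt h⟩
        · rw [if_neg hd]
          have h1 := ih (i + 1) d h
          exact ⟨by omega, h1.2⟩
    · rw [dif_neg h]; exact ⟨hi, le_refl _⟩

-- the right-hand side of the main invariant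
def pvRhs (s : List Char) (fuel i : Nat) : List Nat → List (Int × String) → List (Int × String)
  | [], acc => acc ++ (pvGoB s fuel i 0).2
  | j :: rest, acc =>
    if (pvGoB s fuel i (rest.length + 1)).1 < s.length then
      pvLoopA s (s.drop ((pvGoB s fuel i (rest.length + 1)).1 + 1))
        ((pvGoB s fuel i (rest.length + 1)).1 + 1) rest
        (acc ++ (pvGoB s fuel i (rest.length + 1)).2
          ++ [((rest.length : Int),
               String.ofList ((s.drop (j + 1)).take ((pvGoB s fuel i (rest.length + 1)).1 - (j + 1))))])
    else acc ++ (pvGoB s fuel i (rest.length + 1)).2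

lemma pvMain (s : List Char) :
    ∀ (fuel i : Nat) (stk : List Nat) (acc : List (Int × String)),
      s.length ≤ i + fuel → i ≤ s.length →
      pvLoopA s (s.drop i) i stk acc = pvRhs s fuel i stk acc := by
  intro fuel
  induction fuel with
  | zero =>
    intro i stk acc hf hi
    have hlen : i = s.length := by omega
    subst hlen
    rw [List.drop_length, pvLoopA_nil]
    cases stk with
    | nil => simp [pvRhs, pvGoB]
    | cons j rest => simp [pvRhs, pvGoB]
  | succ fuel ih =>
    intro i stk acc hf hi
    by_cases h : i < s.length
    · have hdrop : s.drop i = s[i] :: s.drop (i + 1) := List.drop_eq_getElem_cons h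
      rw [hdrop]
      by_cases hc : s[i] = '{'
      · -- open brace: recurse one level deeper
        rw [pvLoopA_open s s[i] _ i stk acc hc]
        rw [ih (i + 1) (i :: stk) acc (by omega) h]
        have hb := pvGoB_bounds s fuel (i + 1) (stk.length + 1) h
        rw [pvRhs]
        by_cases h2 : (pvGoB s fuel (i + 1) (stk.length + 1)).1 < s.length
        · rw [if_pos h2]
          rw [ih ((pvGoB s fuel (i + 1) (stk.length + 1)).1 + 1) stk _ (by omega) (by omega)]
          cases stk with
          | nil =>
            rw [pvRhs, pvRhs, pvGoB, dif_pos h, if_pos hc]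
            simp only [List.length_nil] at h2 ⊢
            rw [if_pos h2]
            simp
          | cons j rest =>
            rw [pvRhs, pvRhs, pvGoB, dif_pos h, if_pos hc]
            simp only [List.length_cons] at h2 ⊢
            rw [if_pos h2]
            by_cases h3 : (pvGoB s fuel ((pvGoB s fuel (i + 1) (rest.length + 1 + 1)).1 + 1) (rest.length + 1)).1 < s.length
            · rw [if_pos h3, if_pos h3]; simp
            · rw [if_neg h3, if_neg h3]; simp
        · rw [if_neg h2]
          cases stk with
          | nil =>
            rw [pvRhs, pvGoB, dif_pos h, if_pos hc]
            simp only [List.length_nil] at h2 ⊢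
            rw [if_neg h2]
          | cons j rest =>
            rw [pvRhs, pvGoB, dif_pos h, if_pos hc]
            simp only [List.length_cons] at h2 ⊢
            rw [if_neg h2]
            rw [if_neg (by omega : ¬ s.length < s.length)]
      · by_cases hc2 : s[i] = '}'
        · cases stk with
          | nil =>
            rw [pvLoopA_close_nil s s[i] _ i acc hc hc2]
            rw [ih (i + 1) [] acc (by omega) h]
            rw [pvRhs, pvRhs, pvGoB, dif_pos h, if_neg hc,
              if_neg (by simp : ¬ (s[i] = '}' ∧ 0 < 0))]
          | cons j rest =>
            rw [pvLoopA_close_cons s s[i] _ i j rest acc hc hc2]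
            rw [pvRhs, pvGoB, dif_pos h, if_neg hc,
              if_pos (⟨hc2, by omega⟩ : s[i] = '}' ∧ 0 < rest.length + 1)]
            simp [h]
        · rw [pvLoopA_other s s[i] _ i stk acc hc hc2]
          rw [ih (i + 1) stk acc (by omega) h]
          cases stk with
          | nil =>
            rw [pvRhs, pvRhs, pvGoB, dif_pos h, if_neg hc,
              if_neg (by simp [hc2] : ¬ (s[i] = '}' ∧ 0 < 0))]
          | cons j rest =>
            rw [pvRhs, pvRhs, pvGoB, dif_pos h, if_neg hc,
              if_neg (by simp [hc2] : ¬ (s[i] = '}' ∧ 0 < rest.length + 1))]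
    · have hlen : i = s.length := by omega
      subst hlen
      rw [List.drop_length, pvLoopA_nil]
      cases stk with
      | nil =>
        rw [pvRhs, pvGoB, dif_neg (by omega : ¬ s.length < s.length)]
        simp
      | cons j rest =>
        rw [pvRhs, pvGoB, dif_neg (by omega : ¬ s.length < s.length)]
        rw [if_neg (by omega : ¬ s.length < s.length)]
        simp

-- ===== VERDICT (by name: the statement is the Claim_ definition above) =====
theorem parentheticContents_spec : Claim_equal_parentheticContents := by
  intro string _dom
  unfold Spec_parentheticContents parentheticContents parentheticContents_alt
  set s := string.toList with hs
  have h1 := pvFoldl_eq_loopA s s 0 [] []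
  simp only [Int.natCast_zero, List.map_nil] at h1
  have h2 := pvMain s (s.length + 1) 0 [] [] (by omega) (by omega)
  simp only [List.drop_zero, pvRhs] at h2
  simp only []
  rw [h1, h2]
  simp
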